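-- pv_equiv track=rewrite | github.com/pypi-data/pypi-mirror-339 | packages/synology-office-exporter/synology_office_exporter-0.0.8.tar.gz/synology_office_exporter-0.0.8/synology_office_exporter/exporter.py | convert_synology_to_ms_office_filename
-- ===== SOURCE A (Python) =====
-- from typing import Optional
--
-- def convert_synology_to_ms_office_filename(name: str) -> Optional[str]:
--     """
--     Converts Synology Office file names to Microsoft Office file names.
--
--     File type conversions:
--     - osheet -> xlsx (Excel)
--     - odoc -> docx (Word)
--     - oslides -> pptx (PowerPoint)
--
--     Args:
--         name: The file name to convert
--
--     Returns:
--         str or None: The file name with corresponding Microsoft Office extension.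
--                     Returns None if not a Synology Office file.
--     """
--     extension_mapping = {
--         '.osheet': '.xlsx',
--         '.odoc': '.docx',
--         '.oslides': '.pptx'
--     }
--     for ext, new_ext in extension_mapping.items():
--         if name.endswith(ext):
--             return name[: -len(ext)] + new_ext
--     return None
-- ===== SOURCE B (Python) =====
-- from typing import Optional
--
-- _EXT_MAP = {
--     '.osheet': '.xlsx',
--     '.odoc': '.docx',
--     '.oslides': '.pptx'
-- }
--
-- def convert_synology_to_ms_office_filename(name: str) -> Optional[str]:
--     idx = name.rfind('.')
--     if idx == -1:
--         return None
--     new_ext = _EXT_MAP.get(name[idx:])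
--     if new_ext is None:
--         return None
--     return name[:idx] + new_ext
-- ===== Notes on version B (the rewrite author's own statement) =====
-- stated objective: idiomatic
-- what changed: Replaces the endswith loop over the mapping with a single rfind-based extension extraction followed by one dict lookup.
import Mathlib
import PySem

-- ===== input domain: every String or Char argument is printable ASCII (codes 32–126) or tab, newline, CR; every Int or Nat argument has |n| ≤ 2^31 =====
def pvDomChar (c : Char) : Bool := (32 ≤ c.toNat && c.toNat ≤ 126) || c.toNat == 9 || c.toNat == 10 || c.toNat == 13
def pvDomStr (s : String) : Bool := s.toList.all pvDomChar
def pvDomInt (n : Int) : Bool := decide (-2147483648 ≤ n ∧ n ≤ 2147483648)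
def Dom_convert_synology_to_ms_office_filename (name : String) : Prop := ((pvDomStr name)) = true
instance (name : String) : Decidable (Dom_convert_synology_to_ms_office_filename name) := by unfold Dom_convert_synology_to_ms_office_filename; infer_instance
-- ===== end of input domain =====

-- B replaces A's endswith loop over the mapping by one rfind-based extension extraction
-- plus a single dict lookup (objective: idiomatic).

-- ===== PORT A =====
-- A's dict of extension conversions (insertion order is the loop order).
def pvExtMappingA : PySem.Dict String String :=
  ⟨[(".osheet", ".xlsx"), (".odoc", ".docx"), (".oslides", ".pptx")]⟩

-- the 'for ext, new_ext in extension_mapping.items(): if name.endswith(ext): return …' loop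
def pvConvLoopA (name : String) : List (String × String) → Option String
  | [] => none
  | (ext, new_ext) :: rest =>
      if PySem.Str.endswith name ext then
        some (PySem.Str.slice name none (some (-(ext.length : Int))) ++ new_ext)
      else pvConvLoopA name rest

def convert_synology_to_ms_office_filename (name : String) : Option String :=
  pvConvLoopA name (PySem.Dict.items pvExtMappingA)

-- ===== PORT B =====
def pvExtMapB : PySem.Dict String String :=
  ⟨[(".osheet", ".xlsx"), (".odoc", ".docx"), (".oslides", ".pptx")]⟩

def convert_synology_to_ms_office_filename_alt (name : String) : Option String :=
  let idx := PySem.Str.rfind name "."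
  if idx = -1 then none
  else
    match PySem.Dict.get? pvExtMapB (PySem.Str.slice name (some idx) none) with
    | none => none
    | some new_ext => some (PySem.Str.slice name none (some idx) ++ new_ext)

-- ===== PRECONDITION & SPEC =====
def Spec_convert_synology_to_ms_office_filename (name : String) (out : Option String) : Prop := out = convert_synology_to_ms_office_filename_alt name
instance (name : String) (out : Option String) : Decidable (Spec_convert_synology_to_ms_office_filename name out) := by unfold Spec_convert_synology_to_ms_office_filename; infer_instance

-- ===== CLAIM (what is proved, stated in full; the proofs are below) =====
def Claim_equal_convert_synology_to_ms_office_filename : Prop := ∀ (name : String), Dom_convert_synology_to_ms_office_filename name → Spec_convert_synology_to_ms_office_filename name (convert_synology_to_ms_office_filename name)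

-- ===== LEMMAS AND PROOFS =====

-- rfind.go returns the highest occurrence position
theorem pv_go_eq (l sub : List Char) (j k : Nat) (hj : j ≤ k)
    (hp : sub <+: l.drop j)
    (hmax : ∀ m, j < m → m ≤ k → ¬ sub <+: l.drop m) :
    PySem.Chars.rfind.go l sub k = (j : Int) := by
  induction k with
  | zero =>
      interval_cases j
      simp only [PySem.Chars.rfind.go]
      simp only [List.drop_zero] at hp
      simp [List.isPrefixOf_iff_prefix, hp]
  | succ k ih =>
      simp only [PySem.Chars.rfind.go]
      by_cases hjk : j = k + 1
      · subst hjk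
        simp [List.isPrefixOf_iff_prefix, hp]
      · have hjle : j ≤ k := by omega
        have hnot : ¬ sub <+: l.drop (k + 1) := hmax (k + 1) (by omega) le_rfl
        simp only [List.isPrefixOf_iff_prefix, hnot, if_false]
        exact ih hjle (fun m hm1 hm2 => hmax m hm1 (Nat.le_succ_of_le hm2))

-- a key "'.' followed by dot-free tail" is a suffix of l iff the last dot of l is exactly
-- key.length from the end and the remainder equals the key
theorem pv_key_iff (l key : List Char) (t : List Char) (hkey : key = '.' :: t) (hnd : '.' ∉ t) :
    (key <:+ l) ↔ (0 ≤ PySem.Chars.rfind l ['.'] ∧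
      l.drop (PySem.Chars.rfind l ['.']).toNat = key) := by
  subst hkey
  constructor
  · rintro ⟨p, hp⟩
    have hdrop : l.drop p.length = '.' :: t := by
      subst hp; simp
    have hfind : PySem.Chars.rfind l ['.'] = (p.length : Int) := by
      unfold PySem.Chars.rfind
      apply pv_go_eq
      · have : p.length ≤ l.length := by subst hp; simp
        exact this
      · rw [hdrop]; exact ⟨t, rfl⟩
      · intro m hm1 hm2 hpre
        obtain ⟨r, hr⟩ := hpre
        have hlen : m < l.length := by
          have := congrArg List.length hr
          simp at this; omega
        have hdot : l[m] = '.' := by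
          have := congrArg (fun x => x.head?) hr
          simp only [List.head?_drop, List.cons_append, List.head?_cons] at this
          rw [List.getElem?_eq_getElem hlen] at this
          exact (Option.some.inj this).symm
        -- but l[m] is an element of t, which contains no '.'
        have hmk : m - p.length - 1 < t.length := by
          have := congrArg List.length hp
          simp at this; omega
        have hget : l[m] = t[m - p.length - 1] := by
          subst hp
          rw [List.getElem_append_right (by omega)]
          obtain ⟨i, hi⟩ : ∃ i, m - p.length = i + 1 := ⟨m - p.length - 1, by omega⟩
          simp [hi]
        exact hnd (hdot ▸ hget ▸ List.getElem_mem hmk)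
    rw [hfind]
    exact ⟨by positivity, by simpa using hdrop⟩
  · rintro ⟨h0, hdrop⟩
    rw [← hdrop]
    exact List.drop_suffix _ _

-- rfind never returns anything below -1
theorem pv_go_ge (l sub : List Char) (k : Nat) : -1 ≤ PySem.Chars.rfind.go l sub k := by
  induction k with
  | zero => simp only [PySem.Chars.rfind.go]; split <;> decide
  | succ k ih =>
      simp only [PySem.Chars.rfind.go]
      split
      · omega
      · exact ih

theorem pv_rfind_nonneg (l sub : List Char) (h : PySem.Chars.rfind l sub ≠ -1) :
    0 ≤ PySem.Chars.rfind l sub := by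
  unfold PySem.Chars.rfind at *
  have := pv_go_ge l sub l.length
  omega

-- if key is not a suffix, the slice from any nonnegative index cannot equal key
theorem pv_slice_ne (name key : String) (i : Int) (h0 : 0 ≤ i)
    (h : ¬ key.toList <:+ name.toList) :
    PySem.Str.slice name (some i) none ≠ key := by
  intro he
  apply h
  rw [← he]
  have : (PySem.Str.slice name (some i) none).toList = name.toList.drop i.toNat := by
    rw [PySem.Str.toList_slice, PySem.Chars.slice_eq_listSlice, PySem.List.slice_from _ h0]
  rw [this]
  exact List.drop_suffix _ _

-- the combined consequence of a matching key: rfind lands exactly key.length from the end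
theorem pv_case_pos (name key : String) (t : List Char)
    (hkey : key.toList = '.' :: t) (hnd : '.' ∉ t) (h : key.toList <:+ name.toList) :
    ∃ n : Nat, PySem.Chars.rfind name.toList ['.'] = (n : Int) ∧
      PySem.Str.slice name (some ((n : Int))) none = key ∧
      PySem.Str.slice name none (some (-(key.length : Int))) =
        PySem.Str.slice name none (some ((n : Int))) := by
  obtain ⟨h0, hdrop⟩ := (pv_key_iff name.toList key.toList t hkey hnd).mp h
  refine ⟨(PySem.Chars.rfind name.toList ['.']).toNat, (Int.toNat_of_nonneg h0).symm, ?_, ?_⟩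
  · rw [← String.toList_inj, PySem.Str.toList_slice, PySem.Chars.slice_eq_listSlice,
      PySem.List.slice_from _ (by positivity : (0:Int) ≤ ((PySem.Chars.rfind name.toList ['.']).toNat : Int))]
    rw [Int.toNat_natCast]
    exact hdrop
  · have hklen : 0 < key.toList.length := by rw [hkey]; simp
    have hlen : name.toList.length - (PySem.Chars.rfind name.toList ['.']).toNat = key.toList.length := by
      have := congrArg List.length hdrop
      simpa using this
    have hlt : (PySem.Chars.rfind name.toList ['.']).toNat < name.toList.length := by omega
    rw [← String.toList_inj, PySem.Str.toList_slice, PySem.Str.toList_slice,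
      PySem.Chars.slice_eq_listSlice, PySem.Chars.slice_eq_listSlice]
    rw [← String.length_toList (s := key),
      PySem.List.slice_to_neg_natCast _ _ hklen,
      PySem.List.slice_to _ (by positivity : (0:Int) ≤ ((PySem.Chars.rfind name.toList ['.']).toNat : Int))]
    simp only [Int.toNat_natCast]
    congr 1
    omega

-- ===== VERDICT (by name: the statement is the Claim_ definition above) =====
theorem convert_synology_to_ms_office_filename_spec : Claim_equal_convert_synology_to_ms_office_filename := by
  intro name _
  unfold Spec_convert_synology_to_ms_office_filename
  have hdotl : ("." : String).toList = ['.'] := by decide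
  have hrw : PySem.Str.rfind name "." = PySem.Chars.rfind name.toList ['.'] := by
    rw [PySem.Str.rfind_eq, hdotl]
  by_cases h1 : (".osheet" : String).toList <:+ name.toList
  · obtain ⟨n, hn, hs, hpre⟩ := pv_case_pos name ".osheet" "osheet".toList (by decide) (by decide) h1
    have he : PySem.Str.endswith name ".osheet" = true := by
      rw [PySem.Str.endswith_eq, PySem.Chars.endswith_iff]; exact h1
    have hne : ¬ ((n : Int) = -1) := by omega
    simp only [convert_synology_to_ms_office_filename, convert_synology_to_ms_office_filename_alt,
      pvConvLoopA, pvExtMappingA, pvExtMapB, PySem.Dict.get?,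
      he, hrw, hn, hne, if_true, if_false, List.find?, hs]
    simp [hpre]
  · by_cases h2 : (".odoc" : String).toList <:+ name.toList
    · obtain ⟨n, hn, hs, hpre⟩ := pv_case_pos name ".odoc" "odoc".toList (by decide) (by decide) h2
      have he1 : PySem.Str.endswith name ".osheet" = false := by
        rw [PySem.Str.endswith_eq]
        exact (Bool.not_eq_true _).mp (fun hc => h1 ((PySem.Chars.endswith_iff _ _).mp hc))
      have he2 : PySem.Str.endswith name ".odoc" = true := by
        rw [PySem.Str.endswith_eq, PySem.Chars.endswith_iff]; exact h2
      have hne : ¬ ((n : Int) = -1) := by omega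
      simp only [convert_synology_to_ms_office_filename, convert_synology_to_ms_office_filename_alt,
        pvConvLoopA, pvExtMappingA, pvExtMapB, PySem.Dict.get?,
        he1, he2, hrw, hn, hne, if_true, if_false, List.find?, hs]
      simp [hpre]
    · by_cases h3 : (".oslides" : String).toList <:+ name.toList
      · obtain ⟨n, hn, hs, hpre⟩ := pv_case_pos name ".oslides" "oslides".toList (by decide) (by decide) h3
        have he1 : PySem.Str.endswith name ".osheet" = false := by
          rw [PySem.Str.endswith_eq]
          exact (Bool.not_eq_true _).mp (fun hc => h1 ((PySem.Chars.endswith_iff _ _).mp hc))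
        have he2 : PySem.Str.endswith name ".odoc" = false := by
          rw [PySem.Str.endswith_eq]
          exact (Bool.not_eq_true _).mp (fun hc => h2 ((PySem.Chars.endswith_iff _ _).mp hc))
        have he3 : PySem.Str.endswith name ".oslides" = true := by
          rw [PySem.Str.endswith_eq, PySem.Chars.endswith_iff]; exact h3
        have hne : ¬ ((n : Int) = -1) := by omega
        simp only [convert_synology_to_ms_office_filename, convert_synology_to_ms_office_filename_alt,
          pvConvLoopA, pvExtMappingA, pvExtMapB, PySem.Dict.get?,
          he1, he2, he3, hrw, hn, hne, if_true, if_false, List.find?, hs]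
        simp [hpre]
      · -- no key matches: both sides are none
        have he1 : PySem.Str.endswith name ".osheet" = false := by
          rw [PySem.Str.endswith_eq]
          exact (Bool.not_eq_true _).mp (fun hc => h1 ((PySem.Chars.endswith_iff _ _).mp hc))
        have he2 : PySem.Str.endswith name ".odoc" = false := by
          rw [PySem.Str.endswith_eq]
          exact (Bool.not_eq_true _).mp (fun hc => h2 ((PySem.Chars.endswith_iff _ _).mp hc))
        have he3 : PySem.Str.endswith name ".oslides" = false := by
          rw [PySem.Str.endswith_eq]
          exact (Bool.not_eq_true _).mp (fun hc => h3 ((PySem.Chars.endswith_iff _ _).mp hc))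
        have h1' : ¬ (['.','o','s','h','e','e','t'] <:+ name.toList) := by simpa using h1
        have h2' : ¬ (['.','o','d','o','c'] <:+ name.toList) := by simpa using h2
        have h3' : ¬ (['.','o','s','l','i','d','e','s'] <:+ name.toList) := by simpa using h3
        by_cases hneg : PySem.Chars.rfind name.toList ['.'] = -1
        · simp [convert_synology_to_ms_office_filename,
            convert_synology_to_ms_office_filename_alt, pvConvLoopA, pvExtMappingA,
            PySem.Chars.endswith_iff, h1', h2', h3', hneg]
        · have h0 : 0 ≤ PySem.Chars.rfind name.toList ['.'] := pv_rfind_nonneg _ _ hneg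
          have hs1 := pv_slice_ne name ".osheet" _ h0 h1
          have hs2 := pv_slice_ne name ".odoc" _ h0 h2
          have hs3 := pv_slice_ne name ".oslides" _ h0 h3
          have hb1 : ((".osheet" : String) == PySem.Str.slice name (some (PySem.Chars.rfind name.toList ['.'])) none) = false :=
            beq_eq_false_iff_ne.mpr (Ne.symm hs1)
          have hb2 : ((".odoc" : String) == PySem.Str.slice name (some (PySem.Chars.rfind name.toList ['.'])) none) = false :=
            beq_eq_false_iff_ne.mpr (Ne.symm hs2)
          have hb3 : ((".oslides" : String) == PySem.Str.slice name (some (PySem.Chars.rfind name.toList ['.'])) none) = false :=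
            beq_eq_false_iff_ne.mpr (Ne.symm hs3)
          simp [convert_synology_to_ms_office_filename,
            convert_synology_to_ms_office_filename_alt, pvConvLoopA, pvExtMappingA, pvExtMapB,
            PySem.Dict.get?, PySem.Chars.endswith_iff, h1', h2', h3', hneg, List.find?, hb1, hb2, hb3]
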